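-- pv_equiv track=rewrite | github.com/ani03sha/ai-engineering | tokenization/unigram_lm_tokenizer.py | precompute_matches_for_word
-- ===== SOURCE A (Python) =====
-- def precompute_matches_for_word(
--     word: str, token_to_id: dict[str, int], max_token_length: int
-- ) -> list[list[tuple[int, int]]]:
--     """
--     For a given word, return for each start position a list of (token_id, token_length)
--     where token matches the substring starting there.
--     """
--     L = len(word)
--     matches = [[] for _ in range(L)]
--
--     for i in range(L):
--         # Check all substrings starting at position i
--         for l in range(1, min(max_token_length, L - i) + 1):
--             substring = word[i : i + l]
--             if substring in token_to_id:
--                 token_id = token_to_id[substring]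
--                 matches[i].append((token_id, l))
--
--     return matches
-- ===== SOURCE B (Python) =====
-- def precompute_matches_for_word(word, token_to_id, max_token_length):
--     # Prefix-set pruning: collect every non-empty prefix of every token once, then
--     # at each start position extend the candidate substring one character at a time
--     # and stop as soon as it is no longer a prefix of any token.
--     prefixes = set()
--     for tok in token_to_id:
--         for k in range(1, len(tok) + 1):
--             prefixes.add(tok[:k])
--     L = len(word)
--     matches = []
--     for i in range(L):
--         row = []
--         cur = ""
--         limit = min(max_token_length, L - i)
--         for l, ch in enumerate(word[i : i + max(limit, 0)], start=1):
--             cur += ch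
--             if cur not in prefixes:
--                 break
--             tid = token_to_id.get(cur)
--             if tid is not None:
--                 row.append((tid, l))
--         matches.append(row)
--     return matches
-- ===== Notes on version B (the rewrite author's own statement) =====
-- stated objective: faster
-- what changed: B precomputes the set of all non-empty token prefixes once and replaces A's per-position scan over every substring length by an incremental character-by-character walk that stops as soon as the current substring is no longer a prefix of any token.
import Mathlib
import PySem

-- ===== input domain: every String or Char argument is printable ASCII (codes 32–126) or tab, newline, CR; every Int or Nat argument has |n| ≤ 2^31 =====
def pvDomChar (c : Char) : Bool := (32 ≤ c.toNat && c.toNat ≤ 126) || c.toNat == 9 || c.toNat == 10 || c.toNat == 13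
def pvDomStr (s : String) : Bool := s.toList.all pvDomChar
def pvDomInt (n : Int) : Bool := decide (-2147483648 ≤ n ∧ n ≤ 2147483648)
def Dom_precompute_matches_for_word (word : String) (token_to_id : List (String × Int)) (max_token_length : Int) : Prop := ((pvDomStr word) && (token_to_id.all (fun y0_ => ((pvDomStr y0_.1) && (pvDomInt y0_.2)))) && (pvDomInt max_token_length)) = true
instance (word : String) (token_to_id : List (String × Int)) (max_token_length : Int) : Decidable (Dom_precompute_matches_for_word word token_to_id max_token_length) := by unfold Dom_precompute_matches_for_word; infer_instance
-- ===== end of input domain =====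

-- B replaces A's per-position scan over all substring lengths with a precomputed
-- set of all token prefixes and an incremental walk that stops early (objective: faster on words/tokenizers where most substrings are not token prefixes).


-- ===== PORT A =====
def precompute_matches_for_word (word : String) (token_to_id : List (String × Int)) (max_token_length : Int) : List (List (Int × Int)) :=
  let L : Int := PySem.Str.len word
  (PySem.List.pyRange 0 L 1).map (fun i =>
    (PySem.List.pyRange 1 (min max_token_length (L - i) + 1) 1).foldl (fun acc l =>
      let substring := PySem.Str.slice word (some i) (some (i + l))
      match PySem.Dict.get? (PySem.Dict.mk token_to_id) substring with
      | some token_id => acc ++ [(token_id, l)]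
      | none => acc) [])

-- ===== PORT B =====
-- set of all non-empty prefixes of the tokens (Python: the `prefixes` set)
def pvPrefixes (token_to_id : List (String × Int)) : PySem.Set (List Char) :=
  token_to_id.foldl (fun s p =>
    (PySem.List.pyRange 1 (PySem.Str.len p.1 + 1) 1).foldl
      (fun s k => PySem.Set.add s (PySem.List.slice p.1.toList none (some k))) s)
    PySem.Set.empty

-- the inner `for l, ch in enumerate(...)` loop with its early `break`
def pvWalk (tid : PySem.Dict (List Char) Int) (prefixes : PySem.Set (List Char)) :
    List Char → Int → List Char → List (Int × Int) → List (Int × Int)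
  | [], _, _, row => row
  | c :: rest, l, cur, row =>
    let cur' := cur ++ [c]
    if PySem.Set.contains prefixes cur' then
      match PySem.Dict.get? tid cur' with
      | some t => pvWalk tid prefixes rest (l + 1) cur' (row ++ [(t, l)])
      | none => pvWalk tid prefixes rest (l + 1) cur' row
    else row

def precompute_matches_for_word_alt (word : String) (token_to_id : List (String × Int)) (max_token_length : Int) : List (List (Int × Int)) :=
  let prefixes := pvPrefixes token_to_id
  let tid := PySem.Dict.mk (token_to_id.map (fun p => (p.1.toList, p.2)))
  let wl := word.toList
  let L : Int := PySem.Str.len word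
  (PySem.List.pyRange 0 L 1).map (fun i =>
    let limit := min max_token_length (L - i)
    pvWalk tid prefixes (PySem.List.slice wl (some i) (some (i + max limit 0))) 1 [] [])

-- ===== PRECONDITION & SPEC =====
def Spec_precompute_matches_for_word (word : String) (token_to_id : List (String × Int)) (max_token_length : Int) (out : List (List (Int × Int))) : Prop := out = precompute_matches_for_word_alt word token_to_id max_token_length
instance (word : String) (token_to_id : List (String × Int)) (max_token_length : Int) (out : List (List (Int × Int))) : Decidable (Spec_precompute_matches_for_word word token_to_id max_token_length out) := by unfold Spec_precompute_matches_for_word; infer_instance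

-- ===== CLAIM (what is proved, stated in full; the proofs are below) =====
def Claim_equal_precompute_matches_for_word : Prop := ∀ (word : String) (token_to_id : List (String × Int)) (max_token_length : Int), Dom_precompute_matches_for_word word token_to_id max_token_length → Spec_precompute_matches_for_word word token_to_id max_token_length (precompute_matches_for_word word token_to_id max_token_length)

-- ===== LEMMAS AND PROOFS =====

-- membership in a foldl of Set.add
theorem pv_mem_foldl_add {α β : Type} [BEq β] [LawfulBEq β] (l : List α) (f : α → β)
    (s0 : PySem.Set β) (x : β) :
    x ∈ l.foldl (fun s a => PySem.Set.add s (f a)) s0 ↔ x ∈ s0 ∨ ∃ a ∈ l, x = f a := by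
  induction l generalizing s0 with
  | nil => simp
  | cons a t ih =>
    simp only [List.foldl_cons, ih, PySem.Set.mem_add, List.mem_cons]
    constructor
    · rintro ((h | h) | ⟨b, hb, hx⟩)
      · exact Or.inl h
      · exact Or.inr ⟨a, Or.inl rfl, h⟩
      · exact Or.inr ⟨b, Or.inr hb, hx⟩
    · rintro (h | ⟨b, (rfl | hb), hx⟩)
      · exact Or.inl (Or.inl h)
      · exact Or.inl (Or.inr hx)
      · exact Or.inr ⟨b, hb, hx⟩

theorem pv_mem_pvPrefixes_aux (l : List (String × Int)) (s0 : PySem.Set (List Char)) (x : List Char) :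
    x ∈ l.foldl (fun s p =>
      (PySem.List.pyRange 1 (PySem.Str.len p.1 + 1) 1).foldl
        (fun s k => PySem.Set.add s (PySem.List.slice p.1.toList none (some k))) s) s0
    ↔ x ∈ s0 ∨ ∃ p ∈ l, ∃ k ∈ PySem.List.pyRange 1 (PySem.Str.len p.1 + 1) 1,
        x = PySem.List.slice p.1.toList none (some k) := by
  induction l generalizing s0 with
  | nil => simp
  | cons p t ih =>
    simp only [List.foldl_cons, ih, List.mem_cons]
    rw [pv_mem_foldl_add _ (fun k => PySem.List.slice p.1.toList none (some k))]
    constructor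
    · rintro ((h | ⟨k, hk, hx⟩) | ⟨q, hq, h⟩)
      · exact Or.inl h
      · exact Or.inr ⟨p, Or.inl rfl, k, hk, hx⟩
      · exact Or.inr ⟨q, Or.inr hq, h⟩
    · rintro (h | ⟨q, (rfl | hq), h⟩)
      · exact Or.inl (Or.inl h)
      · exact Or.inl (Or.inr h)
      · exact Or.inr ⟨q, hq, h⟩

theorem pv_mem_pvPrefixes (token_to_id : List (String × Int)) (x : List Char) :
    x ∈ pvPrefixes token_to_id ↔ ∃ p ∈ token_to_id, x ≠ [] ∧ x <+: p.1.toList := by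
  unfold pvPrefixes
  rw [pv_mem_pvPrefixes_aux]
  simp only [PySem.Set.empty]
  constructor
  · rintro (h | ⟨p, hp, k, hk, hx⟩)
    · simp at h
    · refine ⟨p, hp, ?_, ?_⟩
      · rw [PySem.List.mem_pyRange_one] at hk
        have h1 : (1:Int) ≤ k := hk.1
        have h2 : k < PySem.Str.len p.1 + 1 := hk.2
        rw [PySem.Str.len_eq] at h2
        rw [PySem.List.slice_to _ (show (0:Int) ≤ k by omega)] at hx
        subst hx
        have hkl : (p.1.toList.take k.toNat).length = k.toNat := by
          rw [List.length_take]; omega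
        intro hemp
        rw [hemp] at hkl
        simp at hkl
        omega
      · rw [PySem.List.mem_pyRange_one] at hk
        rw [PySem.List.slice_to _ (show (0:Int) ≤ k by omega)] at hx
        subst hx
        exact List.take_prefix _ _
  · rintro ⟨p, hp, hne, hpre⟩
    refine Or.inr ⟨p, hp, (x.length : Int), ?_, ?_⟩
    · rw [PySem.List.mem_pyRange_one, PySem.Str.len_eq]
      have := List.IsPrefix.length_le hpre
      have : x.length ≠ 0 := by simpa using hne
      omega
    · rw [PySem.List.slice_to _ (show (0:Int) ≤ (x.length:Int) by positivity)]
      simp only [Int.toNat_natCast]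
      exact List.prefix_iff_eq_take.mp hpre

-- the List-Char-keyed dict looks up like the String-keyed one
theorem pv_dict_bridge (l : List (String × Int)) (s : String) :
    PySem.Dict.get? (PySem.Dict.mk (l.map (fun p => (p.1.toList, p.2)))) s.toList
      = PySem.Dict.get? (PySem.Dict.mk l) s := by
  induction l with
  | nil => rfl
  | cons p t ih =>
    obtain ⟨k, v⟩ := p
    simp only [List.map_cons, PySem.Dict.get?_mk_cons, ih]
    by_cases h : k = s
    · simp [h]
    · have h2 : (k.toList == s.toList) = false := by
        simp [String.toList_inj]; exact fun hc => h hc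
      have h3 : (k == s) = false := by simp [h]
      simp [h2, h3]

-- a successful lookup means the key is some token's character list
theorem pv_get_some_mem (l : List (String × Int)) (cs : List Char) (v : Int)
    (h : PySem.Dict.get? (PySem.Dict.mk (l.map (fun p => (p.1.toList, p.2)))) cs = some v) :
    ∃ p ∈ l, p.1.toList = cs := by
  induction l with
  | nil => simp [PySem.Dict.get?] at h
  | cons p t ih =>
    simp only [List.map_cons, PySem.Dict.get?_mk_cons] at h
    by_cases hk : (p.1.toList == cs) = true
    · exact ⟨p, List.mem_cons_self, eq_of_beq hk⟩
    · simp [hk] at h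
      obtain ⟨q, hq, hq2⟩ := ih h
      exact ⟨q, List.mem_cons_of_mem _ hq, hq2⟩

-- main per-position walk invariant
theorem pv_walk_eq (token_to_id : List (String × Int)) (wl : List Char) (i limit : Int)
    (hi : 0 ≤ i) (hlim : 0 ≤ limit) (hle : i + limit ≤ (wl.length : Int)) :
    ∀ rest cur : List Char, ∀ row : List (Int × Int),
      cur ++ rest = (wl.drop i.toNat).take limit.toNat →
      pvWalk (PySem.Dict.mk (token_to_id.map (fun p => (p.1.toList, p.2))))
          (pvPrefixes token_to_id) rest ((cur.length : Int) + 1) cur row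
        = (PySem.List.pyRange ((cur.length : Int) + 1) (limit + 1) 1).foldl
            (fun acc l =>
              match PySem.Dict.get? (PySem.Dict.mk (token_to_id.map (fun p => (p.1.toList, p.2))))
                  (PySem.List.slice wl (some i) (some (i + l))) with
              | some token_id => acc ++ [(token_id, l)]
              | none => acc) row := by
  have hseg : ((wl.drop i.toNat).take limit.toNat).length = limit.toNat := by
    rw [List.length_take, List.length_drop]; omega
  intro rest
  induction rest with
  | nil =>
    intro cur row h
    have hcur : cur.length = limit.toNat := by
      have := congrArg List.length h
      simp only [List.length_append, List.length_nil, Nat.add_zero] at this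
      rw [this, hseg]
    rw [PySem.List.pyRange_one_eq_nil (by omega)]
    rfl
  | cons c rest' ih =>
    intro cur row h
    have hlt : cur.length < limit.toNat := by
      have := congrArg List.length h
      simp only [List.length_append, List.length_cons] at this
      omega
    -- the substring of length cur.length+1 starting at i is cur ++ [c]
    have hslice : PySem.List.slice wl (some i) (some (i + ((cur.length : Int) + 1)))
        = cur ++ [c] := by
      rw [PySem.List.slice_toNat _ hi (by omega)]
      have harith : (i + ((cur.length : Int) + 1)).toNat - i.toNat = cur.length + 1 := by omega
      rw [harith]
      have h1 : (wl.drop i.toNat).take (cur.length + 1)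
          = ((wl.drop i.toNat).take limit.toNat).take (cur.length + 1) := by
        rw [List.take_take, Nat.min_eq_left (by omega)]
      rw [h1, ← h, show cur ++ c :: rest' = (cur ++ [c]) ++ rest' by simp]
      exact List.take_left' (by simp)
    rw [PySem.List.pyRange_one_cons (by omega), List.foldl_cons]
    by_cases hc : PySem.Set.contains (pvPrefixes token_to_id) (cur ++ [c]) = true
    · -- still a live prefix: one more step, then the induction hypothesis
      have hcast : (((cur ++ [c]).length : Int)) + 1 = ((cur.length : Int) + 1) + 1 := by
        simp
      cases hg : PySem.Dict.get? (PySem.Dict.mk (token_to_id.map (fun p => (p.1.toList, p.2))))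
          (cur ++ [c]) with
      | some t =>
        have hstep := ih (cur ++ [c]) (row ++ [(t, (cur.length : Int) + 1)]) (by simpa using h)
        rw [hcast] at hstep
        simp only [pvWalk, hc, if_true, hg, hslice]
        exact hstep
      | none =>
        have hstep := ih (cur ++ [c]) row (by simpa using h)
        rw [hcast] at hstep
        simp only [pvWalk, hc, if_true, hg, hslice]
        exact hstep
    · -- dead prefix: the walk stops, and every remaining lookup of A fails
      have hnone : ∀ l' ∈ PySem.List.pyRange (((cur.length : Int) + 1) + 1) (limit + 1) 1,
          PySem.Dict.get? (PySem.Dict.mk (token_to_id.map (fun p => (p.1.toList, p.2))))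
            (PySem.List.slice wl (some i) (some (i + l'))) = none := by
        intro l' hl'
        rw [PySem.List.mem_pyRange_one] at hl'
        cases hg : PySem.Dict.get? (PySem.Dict.mk (token_to_id.map (fun p => (p.1.toList, p.2))))
            (PySem.List.slice wl (some i) (some (i + l'))) with
        | none => rfl
        | some v =>
          exfalso
          obtain ⟨p, hp, hpk⟩ := pv_get_some_mem _ _ _ hg
          have hsl : PySem.List.slice wl (some i) (some (i + l'))
              = (wl.drop i.toNat).take l'.toNat := by
            rw [PySem.List.slice_toNat _ hi (by omega)]
            congr 1
            omega
          have hpre : (cur ++ [c]) <+: PySem.List.slice wl (some i) (some (i + l')) := by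
            rw [hsl, ← hslice, PySem.List.slice_toNat _ hi (by omega),
              show (i + ((cur.length : Int) + 1)).toNat - i.toNat = cur.length + 1 by omega]
            exact List.take_prefix_take_left (by omega)
          have hmem : (cur ++ [c]) ∈ pvPrefixes token_to_id := by
            rw [pv_mem_pvPrefixes]
            exact ⟨p, hp, by simp, by rw [hpk]; exact hpre⟩
          exact hc ((PySem.Set.contains_iff _ _).mpr hmem)
      have hfix : (PySem.List.pyRange (((cur.length : Int) + 1) + 1) (limit + 1) 1).foldl
            (fun acc l =>
              match PySem.Dict.get? (PySem.Dict.mk (token_to_id.map (fun p => (p.1.toList, p.2))))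
                  (PySem.List.slice wl (some i) (some (i + l))) with
              | some token_id => acc ++ [(token_id, l)]
              | none => acc) = fun row => row := by
        funext row0
        rw [List.foldl_ext _ (fun acc _ => acc) row0
          (by intro a b hb; rw [hnone b hb])]
        exact List.foldl_fixed _
      simp only [pvWalk, hc, hslice]
      cases hg : PySem.Dict.get? (PySem.Dict.mk (token_to_id.map (fun p => (p.1.toList, p.2))))
          (cur ++ [c]) with
      | some t =>
        exfalso
        obtain ⟨p, hp, hpk⟩ := pv_get_some_mem _ _ _ hg
        have hmem : (cur ++ [c]) ∈ pvPrefixes token_to_id := by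
          rw [pv_mem_pvPrefixes]
          exact ⟨p, hp, by simp, hpk ▸ List.prefix_refl _⟩
        exact hc ((PySem.Set.contains_iff _ _).mpr hmem)
      | none =>
        rw [congrFun hfix row]
        simp

-- the two programs agree everywhere (no precondition: A is total)
theorem pv_main (word : String) (token_to_id : List (String × Int)) (max_token_length : Int) :
    precompute_matches_for_word word token_to_id max_token_length
      = precompute_matches_for_word_alt word token_to_id max_token_length := by
  unfold precompute_matches_for_word precompute_matches_for_word_alt
  apply List.map_congr_left
  intro i hi
  rw [PySem.List.mem_pyRange_one, PySem.Str.len_eq] at hi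
  obtain ⟨hi0, hiL⟩ := hi
  -- rewrite A's inner body to the List-Char form
  rw [List.foldl_ext _
    (fun acc l =>
      match PySem.Dict.get? (PySem.Dict.mk (token_to_id.map (fun p => (p.1.toList, p.2))))
          (PySem.List.slice word.toList (some i) (some (i + l))) with
      | some token_id => acc ++ [(token_id, l)]
      | none => acc) []
    (by
      intro acc l _
      have hb := pv_dict_bridge token_to_id (PySem.Str.slice word (some i) (some (i + l)))
      rw [PySem.Str.toList_slice, PySem.Chars.slice_eq_listSlice] at hb
      dsimp only
      rw [← hb])]
  rw [PySem.Str.len_eq]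
  dsimp only
  set limit := min max_token_length ((word.toList.length : Int) - i) with hlimdef
  by_cases hpos : 0 < limit
  · have hmax : max limit 0 = limit := by omega
    have hle : i + limit ≤ (word.toList.length : Int) := by omega
    have hrest : ([] : List Char) ++ PySem.List.slice word.toList (some i) (some (i + max limit 0))
        = (word.toList.drop i.toNat).take limit.toNat := by
      rw [hmax, PySem.List.slice_toNat _ hi0 (by omega), List.nil_append]
      congr 1
      omega
    have := pv_walk_eq token_to_id word.toList i limit hi0 (by omega) hle
      (PySem.List.slice word.toList (some i) (some (i + max limit 0))) [] [] hrest
    simp only [List.length_nil, Nat.cast_zero, zero_add] at this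
    exact this.symm
  · -- limit ≤ 0: both the range and the slice are empty
    have hmax : max limit 0 = 0 := by omega
    have hsl : PySem.List.slice word.toList (some i) (some (i + max limit 0)) = [] := by
      rw [hmax, add_zero, PySem.List.slice_toNat _ hi0 hi0]
      simp
    rw [hsl, PySem.List.pyRange_one_eq_nil (by omega)]
    rfl

-- ===== VERDICT (by name: the statement is the Claim_ definition above) =====
theorem precompute_matches_for_word_spec : Claim_equal_precompute_matches_for_word := by
  intro word token_to_id max_token_length _
  unfold Spec_precompute_matches_for_word
  exact pv_main word token_to_id max_token_length
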